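-- pv_equiv track=rewrite | github.com/LaifMin/RatChef | db_utils.py | format_save_results
-- ===== SOURCE A (Python) =====
-- def format_save_results(results):
--     saved   = [r['meal'] for r in results if r['status'] == 'saved']
--     skipped = [r['meal'] for r in results if r['status'] == 'skipped']
--     errors  = [r         for r in results if r['status'] == 'error']
--     parts = []
--     if saved:   parts.append(f"Salvate: {', '.join(saved)}")
--     if skipped: parts.append(f"Già presenti (saltate): {', '.join(skipped)}")
--     if errors:  parts.append(f"Errori: {', '.join(r['meal'] for r in errors)}")
--     return ' | '.join(parts) if parts else 'Nessuna ricetta processata.'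
-- ===== SOURCE B (Python) =====
-- def format_save_results(results):
--     # One pass with three running joined-string accumulators (None = empty category);
--     # no intermediate lists are built at all.
--     saved = skipped = error = None
--     for r in results:
--         s = r['status']
--         if s == 'saved':
--             saved = r['meal'] if saved is None else saved + ', ' + r['meal']
--         elif s == 'skipped':
--             skipped = r['meal'] if skipped is None else skipped + ', ' + r['meal']
--         elif s == 'error':
--             error = r['meal'] if error is None else error + ', ' + r['meal']
--     parts = [lab + val for lab, val in
--              (('Salvate: ', saved), ('Già presenti (saltate): ', skipped), ('Errori: ', error))
--              if val is not None]
--     return ' | '.join(parts) if parts else 'Nessuna ricetta processata.'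
-- ===== Notes on version B (the rewrite author's own statement) =====
-- stated objective: alternative
-- what changed: Replaces A's three filtering list comprehensions plus per-category joins with a single pass keeping three running already-joined string accumulators (Option/None for empty), then assembles parts by filtering a (label, accumulator) table; no intermediate meal lists are built.
import Mathlib
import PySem

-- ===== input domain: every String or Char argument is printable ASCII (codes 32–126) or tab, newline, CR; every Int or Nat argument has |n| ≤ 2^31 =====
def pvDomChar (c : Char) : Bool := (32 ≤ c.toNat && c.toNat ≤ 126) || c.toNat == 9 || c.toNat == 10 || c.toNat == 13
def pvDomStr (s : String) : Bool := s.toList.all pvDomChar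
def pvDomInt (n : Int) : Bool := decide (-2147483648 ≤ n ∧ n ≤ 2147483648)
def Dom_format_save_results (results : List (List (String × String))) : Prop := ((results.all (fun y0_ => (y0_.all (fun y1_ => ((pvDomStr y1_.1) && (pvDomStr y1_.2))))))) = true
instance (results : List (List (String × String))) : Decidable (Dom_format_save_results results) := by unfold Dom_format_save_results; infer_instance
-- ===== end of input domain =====

-- B replaces A's three filtering comprehensions + joins with one pass keeping three running joined-string accumulators; equal on Pre_.


-- ===== PORT A =====
def format_save_results (results : List (List (String × String))) : String :=
  let saved := (results.filter (fun r => PySem.Dict.getD (PySem.Dict.mk r) "status" "" == "saved")).map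
      (fun r => PySem.Dict.getD (PySem.Dict.mk r) "meal" "")
  let skipped := (results.filter (fun r => PySem.Dict.getD (PySem.Dict.mk r) "status" "" == "skipped")).map
      (fun r => PySem.Dict.getD (PySem.Dict.mk r) "meal" "")
  let errors := results.filter (fun r => PySem.Dict.getD (PySem.Dict.mk r) "status" "" == "error")
  let parts : List String := []
  let parts := if saved ≠ [] then parts ++ ["Salvate: " ++ PySem.Str.join ", " saved] else parts
  let parts := if skipped ≠ [] then parts ++ ["Già presenti (saltate): " ++ PySem.Str.join ", " skipped] else parts
  let parts := if errors ≠ [] then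
      parts ++ ["Errori: " ++ PySem.Str.join ", " (errors.map (fun r => PySem.Dict.getD (PySem.Dict.mk r) "meal" ""))]
    else parts
  if parts ≠ [] then PySem.Str.join " | " parts else "Nessuna ricetta processata."

-- ===== PORT B =====
-- `saved = r['meal'] if saved is None else saved + ', ' + r['meal']`
def pvAdd (cur : Option String) (m : String) : Option String :=
  match cur with
  | none => some m
  | some s => some (s ++ ", " ++ m)

-- the body of B's for-loop (state = the three accumulators saved, skipped, error)
def pvStepB (st : Option String × Option String × Option String) (r : List (String × String)) :
    Option String × Option String × Option String :=
  let s := PySem.Dict.getD (PySem.Dict.mk r) "status" ""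
  if s == "saved" then (pvAdd st.1 (PySem.Dict.getD (PySem.Dict.mk r) "meal" ""), st.2.1, st.2.2)
  else if s == "skipped" then (st.1, pvAdd st.2.1 (PySem.Dict.getD (PySem.Dict.mk r) "meal" ""), st.2.2)
  else if s == "error" then (st.1, st.2.1, pvAdd st.2.2 (PySem.Dict.getD (PySem.Dict.mk r) "meal" ""))
  else st

def format_save_results_alt (results : List (List (String × String))) : String :=
  let st := results.foldl pvStepB (none, none, none)
  let parts := ([("Salvate: ", st.1), ("Già presenti (saltate): ", st.2.1),
                 ("Errori: ", st.2.2)] : List (String × Option String)).filterMap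
      (fun p => p.2.map (fun v => p.1 ++ v))
  if parts ≠ [] then PySem.Str.join " | " parts else "Nessuna ricetta processata."

-- ===== PRECONDITION & SPEC =====
-- Pre_ excludes exactly the inputs where Python A raises KeyError: a row without a 'status' key,
-- or a row whose status is saved/skipped/error but which lacks a 'meal' key.
def Pre_format_save_results (results : List (List (String × String))) : Prop :=
  ∀ r ∈ results, (PySem.Dict.get? (PySem.Dict.mk r) "status").isSome = true ∧
    (PySem.Dict.getD (PySem.Dict.mk r) "status" "" ∈ (["saved", "skipped", "error"] : List String) →
      (PySem.Dict.get? (PySem.Dict.mk r) "meal").isSome = true)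
instance (results : List (List (String × String))) : Decidable (Pre_format_save_results results) := by
  unfold Pre_format_save_results; infer_instance
def pvWitness_format_save_results : (List (List (String × String))) :=
  [[("status", "saved"), ("meal", "pasta")], [("status", "error"), ("meal", "pizza")]]
def Spec_format_save_results (results : List (List (String × String))) (out : String) : Prop := out = format_save_results_alt results
instance (results : List (List (String × String))) (out : String) : Decidable (Spec_format_save_results results out) := by unfold Spec_format_save_results; infer_instance

-- ===== CLAIM (what is proved, stated in full; the proofs are below) =====
def Claim_equal_format_save_results : Prop := ∀ (results : List (List (String × String))), Dom_format_save_results results → Pre_format_save_results results → Spec_format_save_results results (format_save_results results)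

-- ===== LEMMAS AND PROOFS =====

-- the meal list of category c, as A computes it
def pvSel (c : String) (results : List (List (String × String))) : List String :=
  (results.filter (fun r => PySem.Dict.getD (PySem.Dict.mk r) "status" "" == c)).map
    (fun r => PySem.Dict.getD (PySem.Dict.mk r) "meal" "")

-- the already-joined form of a meal list (none ↔ empty)
def pvOptJoin (l : List String) : Option String :=
  if l = [] then none else some (PySem.Str.join ", " l)

lemma chars_join_snoc (sep m : List Char) :
    ∀ (l : List (List Char)), l ≠ [] →
      PySem.Chars.join sep (l ++ [m]) = PySem.Chars.join sep l ++ sep ++ m := by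
  intro l
  induction l with
  | nil => intro h; exact absurd rfl h
  | cons x xs ih =>
    intro _
    cases xs with
    | nil => simp [PySem.Chars.join_cons_cons, PySem.Chars.join_singleton]
    | cons y ys =>
      have := ih (by simp)
      simp only [List.cons_append] at this ⊢
      rw [PySem.Chars.join_cons_cons, this, PySem.Chars.join_cons_cons]
      simp [List.append_assoc]

lemma str_join_singleton (sep m : String) : PySem.Str.join sep [m] = m := by
  apply String.toList_inj.mp
  simp [PySem.Str.toList_join, PySem.Chars.join_singleton]

lemma str_join_snoc (sep m : String) (l : List String) (h : l ≠ []) :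
    PySem.Str.join sep (l ++ [m]) = PySem.Str.join sep l ++ sep ++ m := by
  apply String.toList_inj.mp
  simp only [PySem.Str.toList_join, List.map_append, List.map_cons, List.map_nil,
    String.toList_append]
  exact chars_join_snoc sep.toList m.toList (l.map String.toList) (by simpa using h)

lemma pvAdd_optJoin (l : List String) (m : String) :
    pvAdd (pvOptJoin l) m = pvOptJoin (l ++ [m]) := by
  cases l with
  | nil => simp [pvAdd, pvOptJoin, str_join_singleton]
  | cons x xs =>
    have h := str_join_snoc ", " m (x :: xs) (by simp)
    simp only [List.cons_append] at h
    simp [pvAdd, pvOptJoin, h]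

lemma pvSel_cons (c : String) (r : List (String × String)) (rest : List (List (String × String))) :
    pvSel c (r :: rest) =
      (if PySem.Dict.getD (PySem.Dict.mk r) "status" "" == c
        then [PySem.Dict.getD (PySem.Dict.mk r) "meal" ""] else []) ++ pvSel c rest := by
  simp only [pvSel, List.filter_cons]
  split_ifs with h <;> simp

lemma foldB_inv :
    ∀ (results : List (List (String × String))) (a b c : List String),
      results.foldl pvStepB (pvOptJoin a, pvOptJoin b, pvOptJoin c)
        = (pvOptJoin (a ++ pvSel "saved" results), pvOptJoin (b ++ pvSel "skipped" results),
           pvOptJoin (c ++ pvSel "error" results)) := by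
  intro results
  induction results with
  | nil => intro a b c; simp [pvSel]
  | cons r rest ih =>
    intro a b c
    simp only [List.foldl_cons]
    by_cases h1 : PySem.Dict.getD (PySem.Dict.mk r) "status" "" = "saved"
    · have hstep : pvStepB (pvOptJoin a, pvOptJoin b, pvOptJoin c) r =
          (pvOptJoin (a ++ [PySem.Dict.getD (PySem.Dict.mk r) "meal" ""]), pvOptJoin b, pvOptJoin c) := by
        simp [pvStepB, h1, pvAdd_optJoin]
      rw [hstep, ih]
      simp [pvSel_cons, h1, List.append_assoc]
    · by_cases h2 : PySem.Dict.getD (PySem.Dict.mk r) "status" "" = "skipped"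
      · have hstep : pvStepB (pvOptJoin a, pvOptJoin b, pvOptJoin c) r =
            (pvOptJoin a, pvOptJoin (b ++ [PySem.Dict.getD (PySem.Dict.mk r) "meal" ""]), pvOptJoin c) := by
          simp [pvStepB, h2, pvAdd_optJoin]
        rw [hstep, ih]
        simp [pvSel_cons, h2, List.append_assoc]
      · by_cases h3 : PySem.Dict.getD (PySem.Dict.mk r) "status" "" = "error"
        · have hstep : pvStepB (pvOptJoin a, pvOptJoin b, pvOptJoin c) r =
              (pvOptJoin a, pvOptJoin b, pvOptJoin (c ++ [PySem.Dict.getD (PySem.Dict.mk r) "meal" ""])) := by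
            simp [pvStepB, h3, pvAdd_optJoin]
          rw [hstep, ih]
          simp [pvSel_cons, h3, List.append_assoc]
        · have hstep : pvStepB (pvOptJoin a, pvOptJoin b, pvOptJoin c) r =
              (pvOptJoin a, pvOptJoin b, pvOptJoin c) := by
            simp [pvStepB, h1, h2, h3]
          rw [hstep, ih]
          simp [pvSel_cons, h1, h2, h3]

-- ===== VERDICT (by name: the statement is the Claim_ definition above) =====
theorem format_save_results_spec : Claim_equal_format_save_results := by
  intro results _ _
  unfold Spec_format_save_results format_save_results format_save_results_alt
  have hfold := foldB_inv results [] [] []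
  simp only [List.nil_append] at hfold
  have h0 : (pvOptJoin [] , pvOptJoin [], pvOptJoin []) =
      ((none, none, none) : Option String × Option String × Option String) := by
    simp [pvOptJoin]
  rw [← h0, hfold]
  dsimp only
  have e1 : (results.filter (fun r => PySem.Dict.getD (PySem.Dict.mk r) "status" "" == "saved")).map
      (fun r => PySem.Dict.getD (PySem.Dict.mk r) "meal" "") = pvSel "saved" results := rfl
  have e2 : (results.filter (fun r => PySem.Dict.getD (PySem.Dict.mk r) "status" "" == "skipped")).map
      (fun r => PySem.Dict.getD (PySem.Dict.mk r) "meal" "") = pvSel "skipped" results := rfl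
  have e3 : (results.filter (fun r => PySem.Dict.getD (PySem.Dict.mk r) "status" "" == "error")).map
      (fun r => PySem.Dict.getD (PySem.Dict.mk r) "meal" "") = pvSel "error" results := rfl
  rw [e1, e2, e3]
  have hcond : (results.filter (fun r => PySem.Dict.getD (PySem.Dict.mk r) "status" "" == "error") ≠ []) ↔
      (pvSel "error" results ≠ []) := by
    simp [pvSel]
  simp only [hcond]
  by_cases hs : pvSel "saved" results = [] <;>
  by_cases hk : pvSel "skipped" results = [] <;>
  by_cases he : pvSel "error" results = [] <;>
  simp [pvOptJoin, hs, hk, he]
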